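-- pv_equiv track=rewrite | github.com/Guiliang/courses | cuhk-csc-1001/codes/Lecture 9-Data structure and algorithm II.py | is_matched_html
-- ===== SOURCE A (Python) =====
-- class Stack:
--     """Stack data structure (Last‑In First‑Out)."""
--
--     def __init__(self):
--         self._data = []
--
--     def is_empty(self):
--         return len(self._data) == 0
--
--     def push(self, item):
--         self._data.append(item)
--
--     def pop(self):
--         if self.is_empty():
--             raise IndexError("Stack is empty")
--         return self._data.pop()
--
--     def top(self):
--         if self.is_empty():
--             raise IndexError("Stack is empty")
--         return self._data[-1]
--
--     def __repr__(self):
--         return f"Stack({self._data})"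
--
-- def is_matched_html(raw: str) -> bool:
--     """Check for matched HTML tags."""
--     stack = Stack()
--     j = raw.find("<")
--     while j != -1:
--         k = raw.find(">", j + 1)
--         if k == -1:
--             return False
--         tag = raw[j + 1:k]
--         if not tag.startswith("/"):
--             stack.push(tag)
--         else:
--             if stack.is_empty():
--                 return False
--             if stack.pop() != tag[1:]:
--                 return False
--         j = raw.find("<", k + 1)
--     return stack.is_empty()
-- ===== SOURCE B (Python) =====
-- def is_matched_html(raw: str) -> bool:
--     """Check for matched HTML tags: tokenize with a char state machine, then match."""
--     tags = []
--     cur = None  # None = outside a tag; list of chars of the current tag body otherwise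
--     for ch in raw:
--         if cur is None:
--             if ch == '<':
--                 cur = []
--         elif ch == '>':
--             tags.append(''.join(cur))
--             cur = None
--         else:
--             cur.append(ch)
--     if cur is not None:
--         return False  # dangling '<' with no closing '>'
--     stack = []
--     for tag in tags:
--         if tag.startswith('/'):
--             if not stack or stack.pop() != tag[1:]:
--                 return False
--         else:
--             stack.append(tag)
--     return not stack
-- ===== Notes on version B (the rewrite author's own statement) =====
-- stated objective: alternative
-- what changed: Replaces the interleaved find-index/stack loop by two separate passes: a character-by-character state machine that tokenizes tag bodies (rejecting a dangling '<'), then a plain-list stack pass over the token list.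
import Mathlib
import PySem

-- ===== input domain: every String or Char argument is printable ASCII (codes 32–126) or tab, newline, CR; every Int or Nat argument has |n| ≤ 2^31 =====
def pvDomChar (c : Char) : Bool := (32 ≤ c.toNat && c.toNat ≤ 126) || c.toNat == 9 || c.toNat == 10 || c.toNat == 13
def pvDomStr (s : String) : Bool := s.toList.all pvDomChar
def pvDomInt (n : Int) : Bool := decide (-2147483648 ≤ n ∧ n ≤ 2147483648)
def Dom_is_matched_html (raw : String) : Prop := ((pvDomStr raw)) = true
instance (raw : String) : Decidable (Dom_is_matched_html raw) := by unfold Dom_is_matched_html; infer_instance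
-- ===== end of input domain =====

-- B replaces A's interleaved find-index/stack loop by two separate passes: a per-character
-- tokenizing state machine, then a stack pass over the token list (objective: alternative).

-- ===== PORT A =====
-- raw.find(c) followed by the slices raw[j+1:k] / search-from-k+1 is rendered index-free:
-- findSplit c cs scans for the FIRST occurrence of c and returns (chars before it, chars after
-- it) — exactly the values A's find-and-slice steps produce (none = find returned -1).
def findSplit (c : Char) : List Char → Option (List Char × List Char)
  | [] => none
  | x :: xs => if x = c then some ([], xs) else (findSplit c xs).map (fun p => (x :: p.1, p.2))

-- used only for the termination of loopA/tokA (cited in decreasing_by)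
theorem findSplit_shrink (c : Char) (cs : List Char) (p : List Char × List Char)
    (h : findSplit c cs = some p) : p.2.length < cs.length := by
  induction cs generalizing p with
  | nil => simp [findSplit] at h
  | cons x xs ih =>
    by_cases hx : x = c
    · simp [findSplit, hx] at h; subst h; simp
    · simp only [findSplit, hx, if_neg, Option.map_eq_some_iff, not_false_iff] at h
      obtain ⟨q, hq, hp⟩ := h
      subst hp
      simpa using Nat.lt_trans (ih q hq) (Nat.lt_succ_self _)

-- the while loop of A; the stack is a cons-list with the top in front (push = cons, pop = head)
def loopA (cs : List Char) (stack : List (List Char)) : Bool :=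
  match h1 : findSplit '<' cs with
  | none => stack.isEmpty
  | some (_, rest) =>
    match h2 : findSplit '>' rest with
    | none => false
    | some (tag, rest2) =>
      if PySem.Chars.startswith tag ['/'] then
        match stack with
        | [] => false
        | top :: stack' =>
          if top = tag.drop 1 then loopA rest2 stack' else false
      else loopA rest2 (tag :: stack)
termination_by cs.length
decreasing_by
  · exact Nat.lt_trans (findSplit_shrink _ _ _ h2) (findSplit_shrink _ _ _ h1)
  · exact Nat.lt_trans (findSplit_shrink _ _ _ h2) (findSplit_shrink _ _ _ h1)

def is_matched_html (raw : String) : Bool := loopA raw.toList []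

-- ===== PORT B =====
-- pass 1: the per-character state machine; state = (tags so far, current tag body or none)
def tokStep (st : List (List Char) × Option (List Char)) (ch : Char) :
    List (List Char) × Option (List Char) :=
  match st.2 with
  | none => if ch = '<' then (st.1, some []) else st
  | some cur => if ch = '>' then (st.1 ++ [cur], none) else (st.1, some (cur ++ [ch]))

-- pass 2: the for loop over the token list with a plain list as stack (early returns = recursion)
def matchTags (ts : List (List Char)) (stack : List (List Char)) : Bool :=
  match ts with
  | [] => stack.isEmpty
  | tag :: rest =>
    if PySem.Chars.startswith tag ['/'] then
      match stack with
      | [] => false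
      | top :: stack' => if top = tag.drop 1 then matchTags rest stack' else false
    else matchTags rest (tag :: stack)

def is_matched_html_alt (raw : String) : Bool :=
  let st := raw.toList.foldl tokStep ([], none)
  match st.2 with
  | some _ => false       -- dangling '<': cur is not None
  | none => matchTags st.1 []

-- ===== PRECONDITION & SPEC =====
def Spec_is_matched_html (raw : String) (out : Bool) : Prop := out = is_matched_html_alt raw
instance (raw : String) (out : Bool) : Decidable (Spec_is_matched_html raw out) := by unfold Spec_is_matched_html; infer_instance

-- ===== CLAIM (what is proved, stated in full; the proofs are below) =====
def Claim_equal_is_matched_html : Prop := ∀ (raw : String), Dom_is_matched_html raw → Spec_is_matched_html raw (is_matched_html raw)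

-- ===== LEMMAS AND PROOFS =====
theorem findSplit_none (c : Char) (cs : List Char) (h : findSplit c cs = none) : c ∉ cs := by
  induction cs with
  | nil => simp
  | cons x xs ih =>
    by_cases hx : x = c
    · simp [findSplit, hx] at h
    · simp only [findSplit, hx, if_neg, Option.map_eq_none_iff, not_false_iff] at h
      simp only [List.mem_cons, not_or]
      exact ⟨fun hc => hx hc.symm, ih h⟩

theorem findSplit_eq (c : Char) (cs : List Char) (p : List Char × List Char)
    (h : findSplit c cs = some p) : cs = p.1 ++ c :: p.2 ∧ c ∉ p.1 := by
  induction cs generalizing p with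
  | nil => simp [findSplit] at h
  | cons x xs ih =>
    by_cases hx : x = c
    · simp [findSplit, hx] at h; subst h; simp [hx]
    · simp only [findSplit, hx, if_neg, Option.map_eq_some_iff, not_false_iff] at h
      obtain ⟨q, hq, hp⟩ := h
      obtain ⟨h1, h2⟩ := ih q hq
      subst hp
      refine ⟨by simp [h1], ?_⟩
      simp only [List.mem_cons, not_or]
      exact ⟨fun hc => hx hc.symm, h2⟩

-- A's tokenisation, factored out for the proof: the tag bodies A's find steps walk over
-- (none exactly when A hits a '<' with no later '>')
def tokA (cs : List Char) : Option (List (List Char)) :=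
  match h1 : findSplit '<' cs with
  | none => some []
  | some (_, rest) =>
    match h2 : findSplit '>' rest with
    | none => none
    | some (tag, rest2) => (tokA rest2).map (tag :: ·)
termination_by cs.length
decreasing_by
  exact Nat.lt_trans (findSplit_shrink _ _ _ h2) (findSplit_shrink _ _ _ h1)

-- L1: A's interleaved loop = A's tokenisation followed by B's matching pass
theorem loopA_eq_tok (cs : List Char) (stack : List (List Char)) :
    loopA cs stack = (tokA cs).elim false (fun ts => matchTags ts stack) := by
  induction hn : cs.length using Nat.strong_induction_on generalizing cs stack with
  | _ n ih =>
    rw [loopA.eq_def, tokA.eq_def]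
    split
    · simp [matchTags]
    · rename_i pre rest h1
      split
      · simp
      · rename_i tag rest2 h2
        have hlt : rest2.length < n :=
          hn ▸ Nat.lt_trans (findSplit_shrink _ _ _ h2) (findSplit_shrink _ _ _ h1)
        have ihr : ∀ st, loopA rest2 st = (tokA rest2).elim false (fun ts => matchTags ts st) :=
          fun st => ih _ hlt _ st rfl
        cases stack with
        | nil =>
          cases htok : tokA rest2 <;> simp [matchTags, ihr, htok]
        | cons top stack' =>
          cases htok : tokA rest2 <;>
            simp [matchTags, ihr, htok, List.drop_one]

-- the fold ignores non-'<' characters while outside a tag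
theorem fold_outside (pre : List Char) (acc : List (List Char)) (h : '<' ∉ pre) :
    pre.foldl tokStep (acc, none) = (acc, none) := by
  induction pre with
  | nil => rfl
  | cons x xs ih =>
    have hx : x ≠ '<' := fun hc => h (hc ▸ List.mem_cons_self)
    simp only [List.foldl_cons, tokStep, hx, if_false]
    exact ih (fun hc => h (List.mem_cons_of_mem _ hc))

-- inside a tag the fold collects characters until '>', matching findSplit on the remainder
theorem fold_inside (rest : List Char) (acc : List (List Char)) (cur : List Char) :
    (rest.foldl tokStep (acc, some cur)) =
      ((findSplit '>' rest).elim
        (((rest.foldl tokStep (acc, some cur)).1, some (cur ++ rest)))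
        (fun p => p.2.foldl tokStep (acc ++ [cur ++ p.1], none))) := by
  induction rest generalizing acc cur with
  | nil => simp [findSplit]
  | cons x xs ih =>
    by_cases hx : x = '>'
    · subst hx; simp [findSplit, List.foldl_cons, tokStep]
    · simp only [findSplit, hx, if_neg, not_false_iff, List.foldl_cons, tokStep]
      rw [ih acc (cur ++ [x])]
      cases hfs : findSplit '>' xs with
      | none => simp
      | some p => simp

-- L2: from the outside state, B's fold computes exactly A's tokenisation …
theorem fold_tokA_some (cs : List Char) (acc ts : List (List Char))
    (htok : tokA cs = some ts) : cs.foldl tokStep (acc, none) = (acc ++ ts, none) := by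
  induction hn : cs.length using Nat.strong_induction_on generalizing cs acc ts with
  | _ n ih =>
    rw [tokA.eq_def] at htok
    split at htok
    · rename_i h1
      simp only [Option.some.injEq] at htok
      subst htok
      simpa using fold_outside cs acc (findSplit_none _ _ h1)
    · rename_i pre rest h1
      obtain ⟨hcs, hpre⟩ := findSplit_eq _ _ _ h1
      split at htok
      · exact absurd htok (by simp)
      · rename_i tag rest2 h2
        simp only [Option.map_eq_some_iff] at htok
        obtain ⟨ts', hts', rfl⟩ := htok
        have hlt : rest2.length < n :=
          hn ▸ Nat.lt_trans (findSplit_shrink _ _ _ h2) (findSplit_shrink _ _ _ h1)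
        have hins := fold_inside rest acc []
        rw [h2] at hins
        simp only [Option.elim, List.nil_append] at hins
        rw [hcs, List.foldl_append, fold_outside pre acc hpre, List.foldl_cons,
          show tokStep (acc, none) '<' = (acc, some []) from rfl]
        rw [hins, ih _ hlt _ _ _ hts' rfl]
        simp

-- … and ends stuck inside a tag exactly when A's tokenisation fails
theorem fold_tokA_none (cs : List Char) (acc : List (List Char))
    (htok : tokA cs = none) : (cs.foldl tokStep (acc, none)).2.isSome := by
  induction hn : cs.length using Nat.strong_induction_on generalizing cs acc with
  | _ n ih =>
    rw [tokA.eq_def] at htok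
    split at htok
    · exact absurd htok (by simp)
    · rename_i pre rest h1
      obtain ⟨hcs, hpre⟩ := findSplit_eq _ _ _ h1
      split at htok
      · rename_i h2
        have hins := fold_inside rest acc []
        rw [h2] at hins
        simp only [Option.elim, List.nil_append] at hins
        rw [hcs, List.foldl_append, fold_outside pre acc hpre, List.foldl_cons,
          show tokStep (acc, none) '<' = (acc, some []) from rfl]
        rw [hins]
        simp
      · rename_i tag rest2 h2
        simp only [Option.map_eq_none_iff] at htok
        have hlt : rest2.length < n :=
          hn ▸ Nat.lt_trans (findSplit_shrink _ _ _ h2) (findSplit_shrink _ _ _ h1)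
        have hins := fold_inside rest acc []
        rw [h2] at hins
        simp only [Option.elim, List.nil_append] at hins
        rw [hcs, List.foldl_append, fold_outside pre acc hpre, List.foldl_cons,
          show tokStep (acc, none) '<' = (acc, some []) from rfl]
        rw [hins]
        exact ih _ hlt _ _ htok rfl

-- ===== VERDICT (by name: the statement is the Claim_ definition above) =====
theorem is_matched_html_spec : Claim_equal_is_matched_html := by
  intro raw _
  unfold Spec_is_matched_html is_matched_html is_matched_html_alt
  rw [loopA_eq_tok]
  cases htok : tokA raw.toList with
  | none =>
    have h := fold_tokA_none raw.toList [] htok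
    rcases hs : (raw.toList.foldl tokStep ([], none)).2 with _ | cur
    · rw [hs] at h; simp at h
    · simp [hs]
  | some ts =>
    have h := fold_tokA_some raw.toList [] ts htok
    simp [h]
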